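-- pv_equiv track=rewrite | github.com/hweifluids/LatticeUrbanWind | core/deck_io.py | _comment_index
-- ===== SOURCE A (Python) =====
-- def _comment_index(line: str) -> int:
--     in_single = False
--     in_double = False
--     for idx in range(len(line) - 1):
--         ch = line[idx]
--         nxt = line[idx + 1]
--         if ch == "'" and not in_double:
--             in_single = not in_single
--             continue
--         if ch == '"' and not in_single:
--             in_double = not in_double
--             continue
--         if not in_single and not in_double and ch == "/" and nxt == "/":
--             return idx
--     return -1
-- ===== SOURCE B (Python) =====
-- def _comment_index(line: str) -> int:
--     # Pass 1: record the quote state (in_single, in_double) as it stands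
--     # *before* each character, with the same asymmetric toggle rules as A.
--     states = []
--     s = d = False
--     for ch in line:
--         states.append((s, d))
--         if ch == "'" and not d:
--             s = not s
--         elif ch == '"' and not s:
--             d = not d
--     # Pass 2: first unquoted position starting with a double-slash (a '/' never toggles,
--     # so positions inside quotes or at quote chars can never match).
--     for idx in range(len(line) - 1):
--         if states[idx] == (False, False) and line[idx] == "/" and line[idx + 1] == "/":
--             return idx
--     return -1
-- ===== Notes on version B (the rewrite author's own statement) =====
-- stated objective: alternative
-- what changed: Replaces A's single stateful scan with early return by a two-pass decomposition: one pass precomputes the quote-state before every character, a second independent pass finds the first unquoted double-slash comment start by table lookup.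
import Mathlib
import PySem

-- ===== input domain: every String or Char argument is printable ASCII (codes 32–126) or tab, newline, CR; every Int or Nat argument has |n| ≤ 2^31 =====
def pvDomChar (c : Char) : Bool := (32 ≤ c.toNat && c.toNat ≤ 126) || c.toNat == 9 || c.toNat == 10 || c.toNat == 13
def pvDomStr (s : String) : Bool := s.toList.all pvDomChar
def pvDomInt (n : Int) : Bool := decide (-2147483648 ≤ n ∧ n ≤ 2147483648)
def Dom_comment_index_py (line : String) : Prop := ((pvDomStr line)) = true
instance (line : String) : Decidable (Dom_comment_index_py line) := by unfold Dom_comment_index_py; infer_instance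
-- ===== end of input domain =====

-- B replaces A's single stateful scan (early return) by a two-pass decomposition:
-- precompute the quote state before each character, then scan for the first unquoted double-slash.


-- ===== PORT A =====
-- A's loop 'for idx in range(len(line)-1)' carrying (in_single, in_double), early return on a double-slash;
-- rem counts the iterations left (rem = len-1-idx), giving structural recursion.
def commentLoopA (cs : List Char) : Nat → Nat → Bool → Bool → Int
  | 0, _, _, _ => -1
  | rem + 1, idx, in_single, in_double =>
    let ch := cs.getD idx ' '
    let nxt := cs.getD (idx + 1) ' '
    if ch = '\'' ∧ ¬ in_double then
      commentLoopA cs rem (idx + 1) (!in_single) in_double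
    else if ch = '"' ∧ ¬ in_single then
      commentLoopA cs rem (idx + 1) in_single (!in_double)
    else if ¬ in_single ∧ ¬ in_double ∧ ch = '/' ∧ nxt = '/' then
      (idx : Int)
    else
      commentLoopA cs rem (idx + 1) in_single in_double

def comment_index_py (line : String) : Int :=
  commentLoopA line.toList (line.toList.length - 1) 0 false false

-- ===== PORT B =====
-- Pass 1 of Source B: fold over the chars, appending the state *before* each char.
def altStep (acc : List (Bool × Bool) × Bool × Bool) (ch : Char) : List (Bool × Bool) × Bool × Bool :=
  let l' := acc.1 ++ [(acc.2.1, acc.2.2)]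
  if ch = '\'' ∧ ¬ acc.2.2 then (l', !acc.2.1, acc.2.2)
  else if ch = '"' ∧ ¬ acc.2.1 then (l', acc.2.1, !acc.2.2)
  else (l', acc.2.1, acc.2.2)

def altStatesLoop (cs : List Char) : List (Bool × Bool) × Bool × Bool :=
  cs.foldl altStep ([], false, false)

-- Pass 2 of Source B: scan indices 0 .. len-2 for the first unquoted double-slash (rem = iterations left).
def altScan (cs : List Char) (states : List (Bool × Bool)) : Nat → Nat → Int
  | 0, _ => -1
  | rem + 1, idx =>
    if states.getD idx (true, true) = (false, false)
        ∧ cs.getD idx ' ' = '/' ∧ cs.getD (idx + 1) ' ' = '/' then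
      (idx : Int)
    else
      altScan cs states rem (idx + 1)

def comment_index_py_alt (line : String) : Int :=
  altScan line.toList (altStatesLoop line.toList).1 (line.toList.length - 1) 0

-- ===== PRECONDITION & SPEC =====
def Spec_comment_index_py (line : String) (out : Int) : Prop := out = comment_index_py_alt line
instance (line : String) (out : Int) : Decidable (Spec_comment_index_py line out) := by unfold Spec_comment_index_py; infer_instance

-- ===== CLAIM (what is proved, stated in full; the proofs are below) =====
def Claim_equal_comment_index_py : Prop := ∀ (line : String), Dom_comment_index_py line → Spec_comment_index_py line (comment_index_py line)

-- ===== LEMMAS AND PROOFS =====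

-- one quote-state step
def qstep (sd : Bool × Bool) (ch : Char) : Bool × Bool :=
  if ch = '\'' ∧ ¬ sd.2 then (!sd.1, sd.2)
  else if ch = '"' ∧ ¬ sd.1 then (sd.1, !sd.2)
  else sd

-- the list of states-before-each-char starting from sd
def statesFrom (cs : List Char) (sd : Bool × Bool) : List (Bool × Bool) :=
  match cs with
  | [] => []
  | ch :: t => sd :: statesFrom t (qstep sd ch)

theorem altStep_eq (l0 : List (Bool × Bool)) (sd : Bool × Bool) (ch : Char) :
    altStep (l0, sd) ch = (l0 ++ [sd], qstep sd ch) := by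
  obtain ⟨s, d⟩ := sd
  unfold altStep qstep
  dsimp only
  by_cases h1 : ch = '\'' ∧ ¬ d = true
  · rw [if_pos h1, if_pos h1]
  · rw [if_neg h1, if_neg h1]
    by_cases h2 : ch = '"' ∧ ¬ s = true
    · rw [if_pos h2, if_pos h2]
    · rw [if_neg h2, if_neg h2]

theorem altStatesLoop_eq (cs : List Char) :
    ∀ (l0 : List (Bool × Bool)) (sd : Bool × Bool),
    cs.foldl altStep (l0, sd) = (l0 ++ statesFrom cs sd, cs.foldl qstep sd) := by
  induction cs with
  | nil => intro l0 sd; simp [statesFrom]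
  | cons ch t ih =>
    intro l0 sd
    rw [List.foldl_cons, altStep_eq, ih]
    simp [statesFrom]

theorem altStates_spec (cs : List Char) :
    (altStatesLoop cs).1 = statesFrom cs (false, false) := by
  rw [altStatesLoop, altStatesLoop_eq cs [] (false, false)]
  simp

theorem statesFrom_getD (cs : List Char) (sd : Bool × Bool) (idx : Nat)
    (h : idx < cs.length) :
    (statesFrom cs sd).getD idx (true, true) = (cs.take idx).foldl qstep sd := by
  induction cs generalizing sd idx with
  | nil => simp at h
  | cons ch t ih =>
    cases idx with
    | zero => simp [statesFrom]
    | succ k =>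
      simp only [statesFrom, List.getD_cons_succ, List.take_succ_cons, List.foldl_cons]
      exact ih _ _ (by simpa using h)

theorem take_succ_foldl (cs : List Char) (idx : Nat) (h : idx < cs.length) (sd : Bool × Bool) :
    (cs.take (idx + 1)).foldl qstep sd = qstep ((cs.take idx).foldl qstep sd) (cs.getD idx ' ') := by
  have h' : List.take (idx + 1) cs = List.take idx cs ++ [cs[idx]] := by
    rw [List.take_add_one, List.getElem?_eq_getElem h]; rfl
  rw [h', List.foldl_append]
  simp [List.getD_eq_getElem?_getD, List.getElem?_eq_getElem h]

-- main invariant: A's loop with the correct accumulated state equals B's scan, in lockstep on rem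
theorem main_inv (cs : List Char) (rem : Nat) :
    ∀ (idx : Nat) (s d : Bool), rem + idx = cs.length - 1 →
    (cs.take idx).foldl qstep (false, false) = (s, d) →
    commentLoopA cs rem idx s d = altScan cs (statesFrom cs (false, false)) rem idx := by
  induction rem with
  | zero => intro idx s d _ _; rfl
  | succ rem ih =>
    intro idx s d hri h
    have hlen : idx < cs.length := by omega
    have hstep : ∀ (s' d' : Bool), qstep (s, d) (cs.getD idx ' ') = (s', d') →
        (cs.take (idx + 1)).foldl qstep (false, false) = (s', d') := by
      intro s' d' hq
      rw [take_succ_foldl cs idx hlen, h, hq]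
    simp only [commentLoopA, altScan]
    rw [statesFrom_getD cs (false, false) idx hlen, h]
    by_cases h1 : cs.getD idx ' ' = '\'' ∧ ¬ d = true
    · have hne : ¬ ((s, d) = (false, false) ∧ cs.getD idx ' ' = '/' ∧ cs.getD (idx + 1) ' ' = '/') := by
        rintro ⟨-, hc, -⟩; rw [h1.1] at hc; exact absurd hc (by decide)
      rw [if_pos h1, if_neg hne]
      exact ih (idx + 1) (!s) d (by omega)
        (hstep _ _ (by unfold qstep; dsimp only; rw [if_pos h1]))
    · rw [if_neg h1]
      by_cases h2 : cs.getD idx ' ' = '"' ∧ ¬ s = true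
      · have hne : ¬ ((s, d) = (false, false) ∧ cs.getD idx ' ' = '/' ∧ cs.getD (idx + 1) ' ' = '/') := by
          rintro ⟨-, hc, -⟩; rw [h2.1] at hc; exact absurd hc (by decide)
        rw [if_pos h2, if_neg hne]
        exact ih (idx + 1) s (!d) (by omega)
          (hstep _ _ (by unfold qstep; dsimp only; rw [if_neg h1, if_pos h2]))
      · rw [if_neg h2]
        have hq : qstep (s, d) (cs.getD idx ' ') = (s, d) := by
          unfold qstep; dsimp only; rw [if_neg h1, if_neg h2]
        by_cases h3 : ¬ s = true ∧ ¬ d = true ∧ cs.getD idx ' ' = '/' ∧ cs.getD (idx + 1) ' ' = '/'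
        · have heq : (s, d) = (false, false) ∧ cs.getD idx ' ' = '/' ∧ cs.getD (idx + 1) ' ' = '/' := by
            refine ⟨?_, h3.2.2.1, h3.2.2.2⟩
            have hs : s = false := by simpa using h3.1
            have hd : d = false := by simpa using h3.2.1
            rw [hs, hd]
          rw [if_pos h3, if_pos heq]
        · have hne : ¬ ((s, d) = (false, false) ∧ cs.getD idx ' ' = '/' ∧ cs.getD (idx + 1) ' ' = '/') := by
            rintro ⟨hsd, hc, hn⟩
            have hs : s = false := congrArg Prod.fst hsd
            have hd : d = false := congrArg Prod.snd hsd
            exact h3 ⟨by simp [hs], by simp [hd], hc, hn⟩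
          rw [if_neg h3, if_neg hne]
          exact ih (idx + 1) s d (by omega) (hstep _ _ hq)

-- ===== VERDICT (by name: the statement is the Claim_ definition above) =====
theorem comment_index_py_spec : Claim_equal_comment_index_py := by
  intro line _
  show comment_index_py line = comment_index_py_alt line
  rw [comment_index_py, comment_index_py_alt, altStates_spec]
  exact main_inv line.toList (line.toList.length - 1) 0 false false (by omega) (by simp)
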